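-- pv_equiv track=rewrite | github.com/zImpact/renpy_text_linter | utils/offset_to_row_col.py | offset_to_row_col
-- ===== SOURCE A (Python) =====
-- from typing import List, Tuple
--
-- def offset_to_row_col(lines: List[str], offset: int) -> Tuple[int, int]:
--     current_offset = 0
--     for row_index, line in enumerate(lines):
--         line_length = len(line) + 1
--
--         if offset < current_offset + line_length:
--             col_index = offset - current_offset
--             return row_index, col_index
--
--         current_offset += line_length
--
--     return -1, -1
-- ===== SOURCE B (Python) =====
-- from typing import List, Tuple
--
-- def offset_to_row_col(lines: List[str], offset: int) -> Tuple[int, int]: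
--     # Prefix table of line-start offsets + binary search, instead of a running scan.
--     prefix = [0]
--     acc = 0
--     for line in lines:
--         acc += len(line) + 1
--         prefix.append(acc)
--     if not lines or offset >= acc:
--         return -1, -1
--     # hand-written bisect_right(prefix, offset)
--     lo, hi = 0, len(prefix)
--     while lo < hi:
--         mid = (lo + hi) // 2
--         if offset < prefix[mid]:
--             hi = mid
--         else:
--             lo = mid + 1
--     if lo == 0:
--         return 0, offset
--     return lo - 1, offset - prefix[lo - 1]
-- ===== Notes on version B (the rewrite author's own statement) =====
-- stated objective: alternative
-- what changed: Replaces A's running line-by-line offset accumulation with early return by a precomputed prefix table of line-start offsets plus a hand-written binary search (bisect_right) over it.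
import Mathlib
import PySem

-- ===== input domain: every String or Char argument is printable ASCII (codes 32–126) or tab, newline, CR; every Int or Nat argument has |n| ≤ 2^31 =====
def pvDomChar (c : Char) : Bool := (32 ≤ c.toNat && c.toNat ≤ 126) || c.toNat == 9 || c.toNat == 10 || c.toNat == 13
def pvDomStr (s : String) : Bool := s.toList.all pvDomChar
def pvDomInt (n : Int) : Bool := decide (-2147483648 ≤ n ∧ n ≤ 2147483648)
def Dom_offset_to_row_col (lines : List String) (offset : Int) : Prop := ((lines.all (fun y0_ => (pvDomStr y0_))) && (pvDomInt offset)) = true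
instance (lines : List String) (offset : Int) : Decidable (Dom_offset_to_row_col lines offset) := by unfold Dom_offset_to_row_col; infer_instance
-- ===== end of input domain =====

-- ===== PORT A =====
-- B replaces A's running line-by-line accumulation with a prefix-offset table plus binary search (alternative decomposition).
def otrcGo (offset : Int) (lines : List String) (cur : Int) (row : Int) : Int × Int :=
  match lines with
  | [] => (-1, -1)
  | line :: rest =>
    let lineLength : Int := PySem.Str.len line + 1
    if offset < cur + lineLength then (row, offset - cur)
    else otrcGo offset rest (cur + lineLength) (row + 1)

def offset_to_row_col (lines : List String) (offset : Int) : Int × Int :=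
  otrcGo offset lines 0 0

-- ===== PORT B =====
-- the `while lo < hi` binary-search loop of Source B, ported by hand step for step
def bisLoop (offset : Int) (a : List Int) (lo hi : Nat) : Nat :=
  if h : lo < hi then
    -- mid = (lo + hi) // 2; a nonnegative in-range index, so plain getD is exact here
    if offset < a.getD ((lo + hi) / 2) 0 then bisLoop offset a lo ((lo + hi) / 2)
    else bisLoop offset a ((lo + hi) / 2 + 1) hi
  else lo
  termination_by hi - lo
  decreasing_by
  · omega
  · omega

def offset_to_row_col_alt (lines : List String) (offset : Int) : Int × Int :=
  let st := lines.foldl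
    (fun (s : List Int × Int) line =>
      let acc := s.2 + (PySem.Str.len line + 1)
      (s.1 ++ [acc], acc))
    ([0], 0)
  let pref := st.1
  let acc := st.2
  if lines = [] ∨ acc ≤ offset then (-1, -1)
  else
    let lo := bisLoop offset pref 0 pref.length
    if lo = 0 then (0, offset)
    else ((lo : Int) - 1, offset - pref.getD (lo - 1) 0)

-- ===== PRECONDITION & SPEC =====
def Spec_offset_to_row_col (lines : List String) (offset : Int) (out : Int × Int) : Prop := out = offset_to_row_col_alt lines offset
instance (lines : List String) (offset : Int) (out : Int × Int) : Decidable (Spec_offset_to_row_col lines offset out) := by unfold Spec_offset_to_row_col; infer_instance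

-- ===== CLAIM (what is proved, stated in full; the proofs are below) =====
def Claim_equal_offset_to_row_col : Prop := ∀ (lines : List String) (offset : Int), Dom_offset_to_row_col lines offset → Spec_offset_to_row_col lines offset (offset_to_row_col lines offset)

-- ===== LEMMAS AND PROOFS =====

-- reference prefix table: line-start offsets beginning at c
def pfx (c : Int) : List String → List Int
  | [] => [c]
  | line :: rest => c :: pfx (c + (PySem.Str.len line + 1)) rest

def wsum (ls : List String) : Int := (ls.map (fun l => PySem.Str.len l + 1)).sum

lemma wsum_cons (l : String) (ls : List String) :
    wsum (l :: ls) = (PySem.Str.len l + 1) + wsum ls := by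
  simp [wsum]

lemma wsum_nonneg (ls : List String) : 0 ≤ wsum ls := by
  induction ls with
  | nil => simp [wsum]
  | cons l ls ih =>
    have : (0:Int) ≤ PySem.Str.len l := by simp [PySem.Str.len_eq]
    rw [wsum_cons]; omega

lemma pfx_length (c : Int) (ls : List String) : (pfx c ls).length = ls.length + 1 := by
  induction ls generalizing c with
  | nil => simp [pfx]
  | cons l ls ih => simp [pfx, ih]

lemma pfx_shift (ls : List String) (c d : Int) :
    pfx (c + d) ls = (pfx d ls).map (fun x => c + x) := by
  induction ls generalizing d with
  | nil => simp [pfx]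
  | cons l ls ih =>
    simp only [pfx, List.map_cons, List.cons.injEq, true_and]
    rw [add_assoc, ih]

lemma pfx_getD_le (ls : List String) (c : Int) (i : Nat) (hi : i ≤ ls.length) :
    c ≤ (pfx c ls).getD i 0 := by
  induction ls generalizing c i with
  | nil =>
    simp only [List.length_nil, Nat.le_zero] at hi
    subst hi
    simp [pfx]
  | cons l ls ih =>
    cases i with
    | zero => simp [pfx]
    | succ j =>
      have hl : (0:Int) ≤ PySem.Str.len l := by simp [PySem.Str.len_eq]
      have := ih (c + (PySem.Str.len l + 1)) j (by simpa using hi)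
      simp only [pfx, List.getD_cons_succ]
      omega

lemma pfx_getD_last (ls : List String) (c : Int) :
    (pfx c ls).getD ls.length 0 = c + wsum ls := by
  induction ls generalizing c with
  | nil => simp [pfx, wsum]
  | cons l ls ih =>
    simp only [pfx, List.length_cons, List.getD_cons_succ, ih, wsum_cons]
    ring

lemma pfx_getD_cons_succ (l : String) (ls : List String) (i : Nat) (hi : i ≤ ls.length) :
    (pfx 0 (l :: ls)).getD (i + 1) 0 =
      (PySem.Str.len l + 1) + (pfx 0 ls).getD i 0 := by
  have hs : pfx (0 + (PySem.Str.len l + 1)) ls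
      = (pfx 0 ls).map (fun x => (PySem.Str.len l + 1) + x) := by
    rw [add_comm]; exact pfx_shift ls (PySem.Str.len l + 1) 0
  have hlen : i < (pfx 0 ls).length := by rw [pfx_length]; omega
  simp only [pfx, List.getD_cons_succ, zero_add] at *
  rw [hs]
  rw [List.getD_eq_getElem _ _ (by simpa using hlen), List.getD_eq_getElem _ _ hlen]
  simp

-- A's loop returns (row + r, d - pfx[r]) at the first line r whose span contains d = offset - cur
lemma go_found (offset : Int) (ls : List String) :
    ∀ (r : Nat) (cur row : Int), r < ls.length →
      (r = 0 ∨ (pfx 0 ls).getD r 0 ≤ offset - cur) →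
      offset - cur < (pfx 0 ls).getD (r + 1) 0 →
      otrcGo offset ls cur row = (row + (r : Int), offset - cur - (pfx 0 ls).getD r 0) := by
  induction ls with
  | nil => intro r cur row hr; simp at hr
  | cons l rest ih =>
    intro r cur row hr hlo hhi
    have hw : (0:Int) ≤ PySem.Str.len l := by simp [PySem.Str.len_eq]
    cases r with
    | zero =>
      have h1 : (pfx 0 (l :: rest)).getD 1 0 = (PySem.Str.len l + 1) + (pfx 0 rest).getD 0 0 :=
        pfx_getD_cons_succ l rest 0 (by omega)
      have h0 : (pfx 0 rest).getD 0 0 = 0 := by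
        cases rest <;> simp [pfx]
      rw [h1, h0] at hhi
      simp only [otrcGo]
      rw [if_pos (by omega)]
      simp [pfx]
    | succ r' =>
      have hr' : r' < rest.length := by simpa using hr
      have hstep : (pfx 0 (l :: rest)).getD (r' + 1) 0
          = (PySem.Str.len l + 1) + (pfx 0 rest).getD r' 0 :=
        pfx_getD_cons_succ l rest r' (by omega)
      have hstep2 : (pfx 0 (l :: rest)).getD (r' + 1 + 1) 0
          = (PySem.Str.len l + 1) + (pfx 0 rest).getD (r' + 1) 0 :=
        pfx_getD_cons_succ l rest (r' + 1) (by omega)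
      have hnn : 0 ≤ (pfx 0 rest).getD r' 0 := pfx_getD_le rest 0 r' (by omega)
      have hle : (pfx 0 (l :: rest)).getD (r' + 1) 0 ≤ offset - cur := by
        rcases hlo with h | h
        · exact absurd h (by omega)
        · exact h
      rw [hstep] at hle
      simp only [otrcGo]
      rw [if_neg (by omega)]
      have := ih r' (cur + (PySem.Str.len l + 1)) (row + 1) hr'
        (Or.inr (by omega))
        (by rw [hstep2] at hhi; omega)
      rw [this, hstep]
      simp only [Prod.mk.injEq]
      exact ⟨by push_cast; ring, by ring⟩

-- past the end: A's loop falls off and returns (-1, -1)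
lemma go_none (offset : Int) (ls : List String) :
    ∀ (cur row : Int), wsum ls ≤ offset - cur → otrcGo offset ls cur row = (-1, -1) := by
  induction ls with
  | nil => intro cur row _; simp [otrcGo]
  | cons l rest ih =>
    intro cur row h
    have hw : (0:Int) ≤ PySem.Str.len l := by simp [PySem.Str.len_eq]
    have hr := wsum_nonneg rest
    rw [wsum_cons] at h
    simp only [otrcGo]
    rw [if_neg (by omega)]
    exact ih _ _ (by omega)

-- B's foldl builds exactly the reference prefix table and the running total
lemma foldl_pfx (ls : List String) :
    ∀ (pre : List Int) (c : Int),
      ls.foldl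
        (fun (s : List Int × Int) line =>
          let acc := s.2 + (PySem.Str.len line + 1)
          (s.1 ++ [acc], acc))
        (pre ++ [c], c)
      = (pre ++ pfx c ls, c + wsum ls) := by
  induction ls with
  | nil => intro pre c; simp [pfx, wsum]
  | cons l rest ih =>
    intro pre c
    simp only [List.foldl_cons]
    have := ih (pre ++ [c]) (c + (PySem.Str.len l + 1))
    simp only [List.append_assoc, List.cons_append, List.nil_append] at this ⊢
    rw [this]
    simp only [pfx, wsum_cons, Prod.mk.injEq]
    exact ⟨by simp, by ring⟩

-- binary-search loop: the returned index is bracketed by the probed values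
lemma bisLoop_spec (offset : Int) (a : List Int) :
    ∀ (lo hi : Nat), lo ≤ hi → hi ≤ a.length →
      lo ≤ bisLoop offset a lo hi ∧ bisLoop offset a lo hi ≤ hi ∧
      (lo < bisLoop offset a lo hi → a.getD (bisLoop offset a lo hi - 1) 0 ≤ offset) ∧
      (bisLoop offset a lo hi < hi → offset < a.getD (bisLoop offset a lo hi) 0) := by
  intro lo hi
  induction lo, hi using bisLoop.induct offset a with
  | case1 lo hi h hlt ih =>
    intro _ hha
    rw [bisLoop, dif_pos h, if_pos hlt]
    have hm1 : lo ≤ (lo + hi) / 2 := by omega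
    have hm2 : (lo + hi) / 2 < hi := by omega
    obtain ⟨k1, k2, k3, k4⟩ := ih hm1 (by omega)
    refine ⟨k1, by omega, k3, ?_⟩
    intro hk
    by_cases hkm : bisLoop offset a lo ((lo + hi) / 2) < (lo + hi) / 2
    · exact k4 hkm
    · have he : bisLoop offset a lo ((lo + hi) / 2) = (lo + hi) / 2 := by omega
      rw [he]; exact hlt
  | case2 lo hi h hge ih =>
    intro _ hha
    rw [bisLoop, dif_pos h, if_neg hge]
    have hm1 : lo ≤ (lo + hi) / 2 := by omega
    have hm2 : (lo + hi) / 2 < hi := by omega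
    obtain ⟨k1, k2, k3, k4⟩ := ih (by omega) hha
    refine ⟨by omega, k2, ?_, k4⟩
    intro _
    by_cases hkm : (lo + hi) / 2 + 1 < bisLoop offset a ((lo + hi) / 2 + 1) hi
    · exact k3 hkm
    · have he : bisLoop offset a ((lo + hi) / 2 + 1) hi = (lo + hi) / 2 + 1 := by omega
      rw [he]
      simpa using hge
  | case3 lo hi h =>
    intro hle _
    rw [bisLoop, dif_neg h]
    exact ⟨le_refl _, hle, fun hc => absurd hc (lt_irrefl _), fun hc => absurd hc h⟩

-- ===== VERDICT (by name: the statement is the Claim_ definition above) =====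
theorem offset_to_row_col_spec : Claim_equal_offset_to_row_col := by
  intro lines offset _
  unfold Spec_offset_to_row_col offset_to_row_col offset_to_row_col_alt
  have hfold := foldl_pfx lines [] 0
  simp only [List.nil_append] at hfold
  rw [hfold]
  simp only [zero_add]
  cases lines with
  | nil => simp [otrcGo]
  | cons l0 rest =>
    set ls : List String := l0 :: rest with hls
    have hne : ls ≠ [] := by simp [hls]
    by_cases hbig : wsum ls ≤ offset
    · rw [if_pos (Or.inr hbig)]
      exact go_none offset ls 0 0 (by omega)
    · rw [if_neg (by push Not; exact ⟨hne, by omega⟩)]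
      have hlen : (pfx 0 ls).length = ls.length + 1 := pfx_length 0 ls
      obtain ⟨k1, k2, k3, k4⟩ := bisLoop_spec offset (pfx 0 ls) 0 (pfx 0 ls).length
        (by omega) (le_refl _)
      set k := bisLoop offset (pfx 0 ls) 0 (pfx 0 ls).length with hk
      have hkne : k ≠ ls.length + 1 := by
        intro hke
        have := k3 (by omega)
        rw [hke] at this
        simp only [Nat.add_sub_cancel] at this
        rw [pfx_getD_last] at this
        omega
      have hklt : k < (pfx 0 ls).length := by omega
      have hk4 := k4 hklt
      by_cases hk0 : k = 0
      · rw [if_pos hk0]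
        rw [hk0] at hk4
        have h0 : (pfx 0 ls).getD 0 0 = 0 := by
          rw [hls]; simp [pfx]
        rw [h0] at hk4
        have h1 : offset - 0 < (pfx 0 ls).getD (0 + 1) 0 := by
          have := pfx_getD_le ls 0 (0 + 1) (by simp [hls])
          omega
        have := go_found offset ls 0 0 0 (by simp [hls]) (Or.inl rfl) h1
        rw [this, h0]
        simp
      · rw [if_neg hk0]
        obtain ⟨r, hr⟩ : ∃ r, k = r + 1 := ⟨k - 1, by omega⟩
        have hrlt : r < ls.length := by omega
        have hge := k3 (by omega)
        rw [hr] at hge hk4 ⊢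
        simp only [Nat.add_sub_cancel] at hge ⊢
        have := go_found offset ls r 0 0 hrlt (Or.inr (by omega)) (by omega)
        rw [this]
        simp only [Prod.mk.injEq]
        exact ⟨by push_cast; ring, by ring⟩
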